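-- pv_equiv track=rewrite | github.com/NiJingzhe/SimpleCADAPI | scripts/sync_ragflow_docs.py | find_heading_indices
-- ===== SOURCE A (Python) =====
-- from typing import Any, Iterable, List, Optional
--
-- def find_heading_indices(lines: List[str], level: int) -> List[int]:
--     prefix = "#" * level + " "
--     indices: List[int] = []
--     in_code_block = False
--     for idx, line in enumerate(lines):
--         stripped = line.lstrip()
--         if stripped.startswith("```") or stripped.startswith("~~~"):
--             in_code_block = not in_code_block
--         if in_code_block:
--             continue
--         if line.startswith(prefix):
--             indices.append(idx)
--     return indices
-- ===== SOURCE B (Python) =====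
-- def find_heading_indices(lines, level):
--     prefix = "#" * level + " "
--     # Pair up fence lines into half-open code-block intervals [open, close),
--     # then collect heading lines whose index falls in no interval.
--     fences = [i for i, line in enumerate(lines)
--               if line.lstrip().startswith(("```", "~~~"))]
--     fences.append(len(lines))  # sentinel close for an unterminated block
--     blocked = set()
--     while len(fences) >= 2:
--         blocked.update(range(fences[0], fences[1]))
--         fences = fences[2:]
--     return [i for i, line in enumerate(lines)
--             if i not in blocked and line.startswith(prefix)]
-- ===== Notes on version B (the rewrite author's own statement) =====
-- stated objective: alternative
-- what changed: Instead of a single scan toggling an in_code_block flag, B first collects all fence-line indices, pairs consecutive fences into half-open blocked intervals (with a sentinel close at len(lines)), materialises a blocked-index set from those intervals, and finally collects heading indices whose index is not blocked.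
import Mathlib
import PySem

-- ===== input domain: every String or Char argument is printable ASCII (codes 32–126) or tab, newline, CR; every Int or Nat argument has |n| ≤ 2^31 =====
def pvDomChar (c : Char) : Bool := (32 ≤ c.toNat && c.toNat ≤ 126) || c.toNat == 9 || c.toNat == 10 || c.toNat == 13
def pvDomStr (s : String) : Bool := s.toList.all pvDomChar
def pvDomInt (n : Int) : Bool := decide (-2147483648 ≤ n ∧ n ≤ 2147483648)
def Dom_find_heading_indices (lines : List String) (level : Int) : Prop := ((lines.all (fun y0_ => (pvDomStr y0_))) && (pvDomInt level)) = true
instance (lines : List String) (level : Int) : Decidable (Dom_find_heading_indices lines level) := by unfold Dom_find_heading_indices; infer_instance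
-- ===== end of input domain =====

-- B replaces A's single flag-toggling scan by: collect fence indices, pair them into half-open blocked intervals (sentinel-closed), materialise a blocked-index set, then filter headings; alternative decomposition, same cost.


-- ===== PORT A =====
-- line is a fence line: its lstrip() starts with ``` or ~~~ (shared by both ports, as in both Pythons)
def pvIsFence (line : String) : Bool :=
  PySem.Str.startswith (PySem.Str.lstrip line) "```" || PySem.Str.startswith (PySem.Str.lstrip line) "~~~"

-- A's loop: idx counter, in_code_block flag, appending matching indices (built front-to-back)
def pvLoopA (pfx : String) (idx : Int) (inCode : Bool) : List String → List Int
  | [] => []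
  | line :: rest =>
    let inCode' := if pvIsFence line then !inCode else inCode
    if inCode' then pvLoopA pfx (idx + 1) inCode' rest
    else if PySem.Str.startswith line pfx then idx :: pvLoopA pfx (idx + 1) inCode' rest
    else pvLoopA pfx (idx + 1) inCode' rest

def find_heading_indices (lines : List String) (level : Int) : List Int :=
  let pfx : String := String.mk (PySem.List.pyRepeat ['#'] level ++ [' '])
  pvLoopA pfx 0 false lines

-- ===== PORT B =====
-- B step 1: the list of fence-line indices
def pvFences (lines : List String) : List Int :=
  (PySem.List.enumerate lines 0).filterMap (fun p => if pvIsFence p.2 then some p.1 else none)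

-- B's while-loop: consume the fence list two at a time, adding range(open, close) to the set
def pvBlockedSet (s : PySem.Set Int) : List Int → PySem.Set Int
  | a :: b :: rest => pvBlockedSet (PySem.Set.update s (PySem.List.pyRange a b 1)) rest
  | _ => s

def find_heading_indices_alt (lines : List String) (level : Int) : List Int :=
  let pfx : String := String.mk (PySem.List.pyRepeat ['#'] level ++ [' '])
  let blocked := pvBlockedSet PySem.Set.empty (pvFences lines ++ [(lines.length : Int)])
  (PySem.List.enumerate lines 0).filterMap
    (fun p => if !(PySem.Set.contains blocked p.1) && PySem.Str.startswith p.2 pfx then some p.1 else none)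

-- ===== PRECONDITION & SPEC =====
def Spec_find_heading_indices (lines : List String) (level : Int) (out : List Int) : Prop := out = find_heading_indices_alt lines level
instance (lines : List String) (level : Int) (out : List Int) : Decidable (Spec_find_heading_indices lines level out) := by unfold Spec_find_heading_indices; infer_instance

-- ===== CLAIM (what is proved, stated in full; the proofs are below) =====
def Claim_equal_find_heading_indices : Prop := ∀ (lines : List String) (level : Int), Dom_find_heading_indices lines level → Spec_find_heading_indices lines level (find_heading_indices lines level)

-- ===== LEMMAS AND PROOFS =====

-- proof-only: per-line "in code block" mask by fence-count parity, the common reference both ports are reduced to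
def pvMaskOf (c : Nat) : List String → List Bool
  | [] => []
  | line :: rest =>
    let c' := if pvIsFence line then c + 1 else c
    (c' % 2 == 1) :: pvMaskOf c' rest

theorem pvMain (pfx : String) (lines : List String) (s : Int) (c : Nat) :
    pvLoopA pfx s (c % 2 == 1) lines =
      (PySem.List.enumerate (lines.zip (pvMaskOf c lines)) s).filterMap
        (fun p => if !p.2.2 && PySem.Str.startswith p.2.1 pfx then some p.1 else none) := by
  induction lines generalizing s c with
  | nil => simp [pvLoopA, pvMaskOf, PySem.List.enumerate_nil]
  | cons l ls ih =>
    simp only [pvLoopA, pvMaskOf, List.zip_cons_cons, PySem.List.enumerate_cons,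
      List.filterMap_cons]
    have key : (if pvIsFence l then !(c % 2 == 1) else (c % 2 == 1))
        = ((if pvIsFence l then c + 1 else c) % 2 == 1) := by
      rcases Nat.mod_two_eq_zero_or_one c with h | h <;>
        by_cases hf : pvIsFence l <;> simp [hf, Nat.add_mod, h]
    rw [key]
    generalize (if pvIsFence l then c + 1 else c) = c'
    have ih' := ih (s + 1) c'
    by_cases hb : (c' % 2 == 1) = true
    · rw [hb] at ih'
      simpa [hb] using ih'
    · simp only [Bool.not_eq_true] at hb
      rw [hb] at ih'
      by_cases hh : PySem.Chars.startswith l.toList pfx.toList <;>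
        simp [hb, hh, ih']

theorem pvMaskOf_length (c : Nat) (ls : List String) : (pvMaskOf c ls).length = ls.length := by
  induction ls generalizing c with
  | nil => rfl
  | cons l ls ih => simp [pvMaskOf, ih]

theorem pvMaskOf_getElem (ls : List String) (c : Nat) (k : Nat) (h : k < ls.length) :
    (pvMaskOf c ls)[k]'(by rw [pvMaskOf_length]; exact h)
      = ((c + (ls.take (k+1)).countP pvIsFence) % 2 == 1) := by
  induction ls generalizing c k with
  | nil => simp at h
  | cons l ls ih =>
    cases k with
    | zero =>
      by_cases hf : pvIsFence l <;> simp [pvMaskOf, hf, List.countP_cons]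
    | succ k =>
      have h' : k < ls.length := by simpa using h
      simp only [pvMaskOf, List.getElem_cons_succ]
      rw [ih (if pvIsFence l then c + 1 else c) k h']
      by_cases hf : pvIsFence l <;>
        simp only [hf, if_true, if_false, List.take_succ_cons, List.countP_cons] <;>
        (congr 1 <;> omega)

-- proof-only: which indices the interval pairs of a fence list cover
def pvPairBlocked : List Int → Int → Bool
  | a :: b :: rest, i => (decide (a ≤ i) && decide (i < b)) || pvPairBlocked rest i
  | _, _ => false

theorem pvMem_pvBlockedSet (F : List Int) (s : PySem.Set Int) (i : Int) :
    (i ∈ pvBlockedSet s F) ↔ (i ∈ s ∨ pvPairBlocked F i = true) := by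
  induction s, F using pvBlockedSet.induct with
  | case1 s a b rest ih =>
    simp only [pvBlockedSet, pvPairBlocked, ih, PySem.Set.mem_update,
      PySem.List.mem_pyRange_one]
    constructor
    · rintro ((h | h) | h)
      · exact Or.inl h
      · exact Or.inr (by simp [h.1, h.2])
      · refine Or.inr ?_
        simp only [Bool.or_eq_true] at *
        exact Or.inr h
    · rintro (h | h)
      · exact Or.inl (Or.inl h)
      · simp only [Bool.or_eq_true, Bool.and_eq_true, decide_eq_true_eq] at h
        rcases h with ⟨h1, h2⟩ | h
        · exact Or.inl (Or.inr ⟨h1, h2⟩)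
        · exact Or.inr h
  | case2 x s h =>
    cases x with
    | nil => simp [pvBlockedSet, pvPairBlocked]
    | cons a F' =>
      cases F' with
      | nil => simp [pvBlockedSet, pvPairBlocked]
      | cons b rest => exact absurd rfl (h a b rest)

theorem pvPairBlocked_parity (F : List Int) (i : Int) :
    F.length % 2 = 0 → F.Pairwise (· < ·) →
    pvPairBlocked F i = ((F.countP (fun a => decide (a ≤ i))) % 2 == 1) := by
  induction F, i using pvPairBlocked.induct with
  | case1 a b rest i ih =>
    intro hev hs
    rcases List.pairwise_cons.1 hs with ⟨ha, hs1⟩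
    rcases List.pairwise_cons.1 hs1 with ⟨hb, hs2⟩
    have hab : a < b := ha b (by simp)
    have hev' : rest.length % 2 = 0 := by simp at hev ⊢; omega
    have ihr := ih hev' hs2
    by_cases h2 : i < b
    · have hrest : rest.countP (fun x => decide (x ≤ i)) = 0 :=
        List.countP_eq_zero.2 (fun x hx => by
          have := hb x hx
          simp only [decide_eq_true_eq]
          omega)
      have hres : pvPairBlocked rest i = false := by
        rw [ihr, hrest]
        simp
      by_cases h1 : a ≤ i <;>
        simp [pvPairBlocked, h1, h2, List.countP_cons, hrest, hres, fun x => not_le.2 x]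
    · have h2' : b ≤ i := by omega
      have h1 : a ≤ i := by omega
      have key : (rest.countP (fun x => decide (x ≤ i)) + 1 + 1) % 2
          = rest.countP (fun x => decide (x ≤ i)) % 2 := by omega
      simp [pvPairBlocked, h1, h2, h2', List.countP_cons, ihr, key]
  | case2 F i h =>
    intro hev _
    cases F with
    | nil => simp [pvPairBlocked]
    | cons a F' =>
      cases F' with
      | nil => simp at hev
      | cons b r => exact absurd rfl (h a b r)

theorem pvPairBlocked_append_singleton (F : List Int) (x i : Int) :
    F.length % 2 = 0 → pvPairBlocked (F ++ [x]) i = pvPairBlocked F i := by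
  induction F, i using pvPairBlocked.induct with
  | case1 a b rest i ih =>
    intro hev
    have hev' : rest.length % 2 = 0 := by simp at hev ⊢; omega
    simp only [List.cons_append, pvPairBlocked]
    rw [ih hev']
  | case2 F i h =>
    intro hev
    cases F with
    | nil => simp [pvPairBlocked]
    | cons a F' =>
      cases F' with
      | nil => simp at hev
      | cons b r => exact absurd rfl (h a b r)

theorem pvFences_countP (ls : List String) (s i : Int) :
    ((PySem.List.enumerate ls s).filterMap (fun p => if pvIsFence p.2 then some p.1 else none)).countP
      (fun a => decide (a ≤ i))
    = (ls.take (i - s + 1).toNat).countP pvIsFence := by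
  induction ls generalizing s with
  | nil => simp [PySem.List.enumerate_nil]
  | cons l ls ih =>
    simp only [PySem.List.enumerate_cons, List.filterMap_cons]
    by_cases hs : s ≤ i
    · have ht : (i - s + 1).toNat = (i - (s + 1) + 1).toNat + 1 := by omega
      rw [ht]
      by_cases hf : pvIsFence l <;>
        simp [hf, List.countP_cons, ih (s + 1), hs, List.take_succ_cons]
    · have ht : (i - s + 1).toNat = 0 := by omega
      have ht2 : (i - (s + 1) + 1).toNat = 0 := by omega
      by_cases hf : pvIsFence l <;>
        simp [hf, List.countP_cons, ih (s + 1), hs, ht, ht2]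

theorem pvFences_sorted_bounds (ls : List String) (s : Int) :
    ((PySem.List.enumerate ls s).filterMap (fun p => if pvIsFence p.2 then some p.1 else none)).Pairwise (· < ·)
    ∧ ∀ x ∈ (PySem.List.enumerate ls s).filterMap (fun p => if pvIsFence p.2 then some p.1 else none),
        s ≤ x ∧ x < s + ls.length := by
  induction ls generalizing s with
  | nil => simp [PySem.List.enumerate_nil]
  | cons l ls ih =>
    obtain ⟨hp, hb⟩ := ih (s + 1)
    simp only [PySem.List.enumerate_cons, List.filterMap_cons]
    by_cases hf : pvIsFence l
    · simp only [hf, if_true]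
      refine ⟨List.pairwise_cons.2 ⟨fun x hx => by have := (hb x hx).1; omega, hp⟩, ?_⟩
      intro x hx
      rcases List.mem_cons.1 hx with rfl | hx
      · refine ⟨le_refl _, ?_⟩
        simp only [List.length_cons]
        push_cast
        omega
      · have := hb x hx
        refine ⟨by omega, ?_⟩
        simp only [List.length_cons]
        push_cast at this ⊢
        omega
    · simp only [hf, if_false]
      refine ⟨hp, fun x hx => ?_⟩
      have := hb x hx
      refine ⟨by omega, ?_⟩
      simp only [List.length_cons]
      push_cast at this ⊢
      omega

theorem pvBlocked_eq_mask (lines : List String) (k : Nat) (h : k < lines.length) :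
    PySem.Set.contains (pvBlockedSet PySem.Set.empty (pvFences lines ++ [(lines.length : Int)])) (k : Int)
    = ((lines.take (k+1)).countP pvIsFence % 2 == 1) := by
  obtain ⟨hsort, hbnd⟩ := pvFences_sorted_bounds lines 0
  have hmem : ((k : Int) ∈ pvBlockedSet PySem.Set.empty (pvFences lines ++ [(lines.length : Int)]))
      ↔ pvPairBlocked (pvFences lines ++ [(lines.length : Int)]) (k : Int) = true := by
    rw [pvMem_pvBlockedSet]
    simp [PySem.Set.empty]
  have hcnt : (pvFences lines).countP (fun a => decide (a ≤ (k : Int)))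
      = (lines.take (k+1)).countP pvIsFence := by
    have := pvFences_countP lines 0 (k : Int)
    simpa [pvFences, show ((k : Int) - 0 + 1).toNat = k + 1 by omega] using this
  have hpb : pvPairBlocked (pvFences lines ++ [(lines.length : Int)]) (k : Int)
      = ((lines.take (k+1)).countP pvIsFence % 2 == 1) := by
    rcases Nat.mod_two_eq_zero_or_one (pvFences lines).length with hev | hodd
    · rw [pvPairBlocked_append_singleton _ _ _ hev,
        pvPairBlocked_parity _ _ hev hsort, hcnt]
    · have hev2 : (pvFences lines ++ [(lines.length : Int)]).length % 2 = 0 := by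
        simp [hodd]; omega
      have hsort2 : (pvFences lines ++ [(lines.length : Int)]).Pairwise (· < ·) := by
        rw [List.pairwise_append]
        refine ⟨hsort, List.pairwise_singleton _ _, fun x hx y hy => ?_⟩
        have := (hbnd x hx).2
        simp at hy
        omega
      rw [pvPairBlocked_parity _ _ hev2 hsort2]
      have hnk : ¬ ((lines.length : Int) ≤ (k : Int)) := by
        simp; exact_mod_cast h
      simp [List.countP_append, hnk, hcnt]
  rw [← hpb]
  by_cases hc : pvPairBlocked (pvFences lines ++ [(lines.length : Int)]) (k : Int) = true
  · rw [hc]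
    exact (PySem.Set.contains_iff _ _).2 (hmem.2 hc)
  · simp only [Bool.not_eq_true] at hc
    rw [hc]
    refine Bool.eq_false_iff.2 (fun ht => ?_)
    have hmm := hmem.1 ((PySem.Set.contains_iff _ _).1 ht)
    rw [hc] at hmm
    exact Bool.false_ne_true hmm

theorem pvFilterMask_eq (ls : List String) (mask : List Bool) (g : Int → Bool) (pfx : String) (s : Int)
    (hlen : mask.length = ls.length)
    (hagree : ∀ (k : Nat) (h : k < ls.length), mask[k]'(by omega) = g (s + k)) :
    (PySem.List.enumerate (ls.zip mask) s).filterMap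
        (fun p => if !p.2.2 && PySem.Str.startswith p.2.1 pfx then some p.1 else none)
    = (PySem.List.enumerate ls s).filterMap
        (fun p => if !(g p.1) && PySem.Str.startswith p.2 pfx then some p.1 else none) := by
  induction ls generalizing mask s with
  | nil =>
    have : mask = [] := List.eq_nil_of_length_eq_zero (by simpa using hlen)
    subst this
    simp [PySem.List.enumerate_nil]
  | cons l ls ih =>
    cases mask with
    | nil => simp at hlen
    | cons m mask =>
      have hm : m = g s := by simpa using hagree 0 (by simp)
      have hrec := ih mask (s + 1) (by simpa using hlen)
        (fun k h => by
          have := hagree (k + 1) (by simpa using h)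
          simpa [show s + ((k : Int) + 1) = s + 1 + (k : Int) by ring] using this)
      simp only [List.zip_cons_cons, PySem.List.enumerate_cons, List.filterMap_cons, hrec, hm]

-- ===== VERDICT (by name: the statement is the Claim_ definition above) =====
theorem find_heading_indices_spec : Claim_equal_find_heading_indices := by
  intro lines level _
  show find_heading_indices lines level = find_heading_indices_alt lines level
  have h1 : find_heading_indices lines level
      = (PySem.List.enumerate (lines.zip (pvMaskOf 0 lines)) 0).filterMap
          (fun p => if !p.2.2 && PySem.Str.startswith p.2.1 (String.mk (PySem.List.pyRepeat ['#'] level ++ [' '])) then some p.1 else none) := by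
    simpa [find_heading_indices] using pvMain (String.mk (PySem.List.pyRepeat ['#'] level ++ [' '])) lines 0 0
  rw [h1]
  exact pvFilterMask_eq lines (pvMaskOf 0 lines)
    (fun i => PySem.Set.contains (pvBlockedSet PySem.Set.empty (pvFences lines ++ [(lines.length : Int)])) i)
    (String.mk (PySem.List.pyRepeat ['#'] level ++ [' '])) 0 (pvMaskOf_length 0 lines)
    (fun k h => by
      rw [pvMaskOf_getElem lines 0 k h]
      have := pvBlocked_eq_mask lines k h
      simpa using this.symm)
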